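-- pv_equiv track=rewrite | github.com/ramonbnuezjr/nyc-services-assistant | src/tests/baseline_evaluation.py | _evaluate_response_quality
-- ===== SOURCE A (Python) =====
-- def _evaluate_response_quality(query: str, response: str) -> bool:
--     """
--     Evaluate if the LLM response quality is acceptable for MVP.
--
--     Args:
--         query: Original user query
--         response: LLM generated response
--
--     Returns:
--         True if response quality is acceptable
--     """
--     # Basic quality checks
--     if not response or len(response.strip()) < 30:  # Reduced from 50 to 30 for MVP
--         return False
--
--     # Check if response contains relevant keywords based on query
--     query_lower = query.lower()
--     response_lower = response.lower()
--
--     # Service-specific quality indicators (more lenient for MVP)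
--     if "unemployment" in query_lower:
--         quality_indicators = ["apply", "benefits", "department", "labor", "online", "documents", "unemployment"]
--     elif "snap" in query_lower or "food stamps" in query_lower:
--         quality_indicators = ["apply", "benefits", "income", "documents", "ebt", "interview", "snap", "food"]
--     elif "medicaid" in query_lower:
--         quality_indicators = ["apply", "coverage", "health", "income", "documents", "enroll", "medicaid"]
--     elif "cash assistance" in query_lower:
--         quality_indicators = ["apply", "assistance", "income", "documents", "work", "requirements", "cash"]
--     elif "child care" in query_lower or "childcare" in query_lower:
--         quality_indicators = ["apply", "subsidy", "child care", "provider", "income", "documents", "childcare"]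
--     else:
--         quality_indicators = ["apply", "benefits", "documents", "process", "help"]
--
--     # More lenient quality check for MVP: at least 1 quality indicator
--     indicator_count = sum(1 for indicator in quality_indicators if indicator in response_lower)
--     return indicator_count >= 1  # Reduced from 2 to 1 for MVP
-- ===== SOURCE B (Python) =====
-- # Inverted index: indicator -> bitmask of services it counts for.
-- # bits: unemployment=1, snap=2, medicaid=4, cash=8, childcare=16, default=32
-- _INDEX = {
--     "apply": 63,
--     "benefits": 35,
--     "department": 1,
--     "labor": 1,
--     "online": 1,
--     "documents": 63,
--     "unemployment": 1,
--     "income": 30,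
--     "ebt": 2,
--     "interview": 2,
--     "snap": 2,
--     "food": 2,
--     "coverage": 4,
--     "health": 4,
--     "enroll": 4,
--     "medicaid": 4,
--     "assistance": 8,
--     "work": 8,
--     "requirements": 8,
--     "cash": 8,
--     "subsidy": 16,
--     "child care": 16,
--     "provider": 16,
--     "childcare": 16,
--     "process": 32,
--     "help": 32,
-- }
--
--
-- def _service_bit(query_lower: str) -> int:
--     if "unemployment" in query_lower:
--         return 1
--     if "snap" in query_lower or "food stamps" in query_lower:
--         return 2
--     if "medicaid" in query_lower:
--         return 4
--     if "cash assistance" in query_lower: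
--         return 8
--     if "child care" in query_lower or "childcare" in query_lower:
--         return 16
--     return 32
--
--
-- def _evaluate_response_quality(query: str, response: str) -> bool:
--     if not response or len(response.strip()) < 30:
--         return False
--     bit = _service_bit(query.lower())
--     response_lower = response.lower()
--     return any(mask & bit and ind in response_lower for ind, mask in _INDEX.items())
-- ===== Notes on version B (the rewrite author's own statement) =====
-- stated objective: alternative
-- what changed: Replaced per-branch indicator lists that are counted over with one global inverted index (indicator -> bitmask of services); B computes a service bit from the query and scans the whole index once, accepting any present indicator whose mask contains that bit.
import Mathlib
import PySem

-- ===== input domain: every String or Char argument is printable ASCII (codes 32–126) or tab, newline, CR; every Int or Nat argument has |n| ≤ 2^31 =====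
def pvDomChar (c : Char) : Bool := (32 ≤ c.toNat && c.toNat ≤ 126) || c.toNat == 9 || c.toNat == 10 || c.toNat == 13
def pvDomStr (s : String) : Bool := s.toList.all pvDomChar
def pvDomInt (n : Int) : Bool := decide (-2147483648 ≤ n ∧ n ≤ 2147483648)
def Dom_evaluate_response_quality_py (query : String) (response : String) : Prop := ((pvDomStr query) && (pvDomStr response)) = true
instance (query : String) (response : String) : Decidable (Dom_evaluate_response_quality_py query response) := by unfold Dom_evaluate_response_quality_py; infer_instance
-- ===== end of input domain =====

-- B replaces A's per-branch indicator lists (selected by an if/elif chain and counted over)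
-- with a single global inverted index (indicator -> bitmask of services): B computes a service
-- bit from the query and scans the whole index once, accepting any indicator present in the
-- response whose mask contains that bit.

-- ===== PORT A =====
def evaluate_response_quality_py (query : String) (response : String) : Bool :=
  if response == "" || PySem.Str.len (PySem.Str.strip response) < 30 then false
  else
    let query_lower := PySem.Str.lower query
    let response_lower := PySem.Str.lower response
    let quality_indicators :=
      if PySem.Str.isIn "unemployment" query_lower then
        ["apply", "benefits", "department", "labor", "online", "documents", "unemployment"]
      else if PySem.Str.isIn "snap" query_lower || PySem.Str.isIn "food stamps" query_lower then
        ["apply", "benefits", "income", "documents", "ebt", "interview", "snap", "food"]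
      else if PySem.Str.isIn "medicaid" query_lower then
        ["apply", "coverage", "health", "income", "documents", "enroll", "medicaid"]
      else if PySem.Str.isIn "cash assistance" query_lower then
        ["apply", "assistance", "income", "documents", "work", "requirements", "cash"]
      else if PySem.Str.isIn "child care" query_lower || PySem.Str.isIn "childcare" query_lower then
        ["apply", "subsidy", "child care", "provider", "income", "documents", "childcare"]
      else
        ["apply", "benefits", "documents", "process", "help"]
    let indicator_count : Int :=
      quality_indicators.foldl
        (fun acc indicator => if PySem.Str.isIn indicator response_lower then acc + 1 else acc) 0
    decide (indicator_count ≥ 1)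

-- ===== PORT B =====
-- inverted index: indicator -> bitmask of the services it counts for
-- (bits: unemployment=1, snap=2, medicaid=4, cash=8, childcare=16, default=32)
def pvIndex : List (String × Nat) :=
  [ ("apply", 63), ("benefits", 35), ("department", 1), ("labor", 1), ("online", 1),
    ("documents", 63), ("unemployment", 1), ("income", 30), ("ebt", 2), ("interview", 2),
    ("snap", 2), ("food", 2), ("coverage", 4), ("health", 4), ("enroll", 4), ("medicaid", 4),
    ("assistance", 8), ("work", 8), ("requirements", 8), ("cash", 8), ("subsidy", 16),
    ("child care", 16), ("provider", 16), ("childcare", 16), ("process", 32), ("help", 32) ]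

def pvServiceBit (query_lower : String) : Nat :=
  if PySem.Str.isIn "unemployment" query_lower then 1
  else if PySem.Str.isIn "snap" query_lower || PySem.Str.isIn "food stamps" query_lower then 2
  else if PySem.Str.isIn "medicaid" query_lower then 4
  else if PySem.Str.isIn "cash assistance" query_lower then 8
  else if PySem.Str.isIn "child care" query_lower || PySem.Str.isIn "childcare" query_lower then 16
  else 32

def evaluate_response_quality_py_alt (query : String) (response : String) : Bool :=
  if response == "" || PySem.Str.len (PySem.Str.strip response) < 30 then false
  else
    let bit := pvServiceBit (PySem.Str.lower query)
    let response_lower := PySem.Str.lower response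
    pvIndex.any (fun p => (p.2 &&& bit != 0) && PySem.Str.isIn p.1 response_lower)

-- ===== PRECONDITION & SPEC =====
def Spec_evaluate_response_quality_py (query : String) (response : String) (out : Bool) : Prop := out = evaluate_response_quality_py_alt query response
instance (query : String) (response : String) (out : Bool) : Decidable (Spec_evaluate_response_quality_py query response out) := by unfold Spec_evaluate_response_quality_py; infer_instance

-- ===== CLAIM =====
def Claim_equal_evaluate_response_quality_py : Prop := ∀ (query : String) (response : String), Dom_evaluate_response_quality_py query response → Spec_evaluate_response_quality_py query response (evaluate_response_quality_py query response)

-- ===== LEMMAS AND PROOFS =====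

-- a 0/1-count being ≥ 1 is exactly 'some element satisfies the predicate'
theorem pv_count_ge_one_iff_any (l : List String) (r : String) :
    decide (1 ≤ l.foldl (fun acc ind => if PySem.Str.isIn ind r then acc + 1 else acc) (0 : Int)) =
      l.any (fun ind => PySem.Str.isIn ind r) := by
  rw [PySem.List.foldl_if_add_one]
  rcases h : l.any (fun ind => PySem.Str.isIn ind r)
  · simp only [List.any_eq_false] at h
    have h0 : l.countP (fun ind => PySem.Str.isIn ind r) = 0 :=
      List.countP_eq_zero.mpr (fun a ha => h a ha)
    rw [h0]; decide
  · simp only [List.any_eq_true] at h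
    obtain ⟨a, ha, hp⟩ := h
    have hpos : 0 < l.countP (fun ind => PySem.Str.isIn ind r) :=
      List.countP_pos_iff.mpr ⟨a, ha, hp⟩
    have h1 : (1 : Int) ≤ 0 + ↑(l.countP (fun ind => PySem.Str.isIn ind r)) := by
      omega
    exact decide_eq_true h1

theorem pv_branch1 (r : String) :
    (List.any ["apply", "benefits", "department", "labor", "online", "documents", "unemployment"] (fun ind => PySem.Str.isIn ind r)) =
      pvIndex.any (fun p => (p.2 &&& 1 != 0) && PySem.Str.isIn p.1 r) := by
  rw [Bool.eq_iff_iff]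
  simp [pvIndex]

theorem pv_branch2 (r : String) :
    (List.any ["apply", "benefits", "income", "documents", "ebt", "interview", "snap", "food"] (fun ind => PySem.Str.isIn ind r)) =
      pvIndex.any (fun p => (p.2 &&& 2 != 0) && PySem.Str.isIn p.1 r) := by
  rw [Bool.eq_iff_iff]
  simp [pvIndex]
  tauto

theorem pv_branch3 (r : String) :
    (List.any ["apply", "coverage", "health", "income", "documents", "enroll", "medicaid"] (fun ind => PySem.Str.isIn ind r)) =
      pvIndex.any (fun p => (p.2 &&& 4 != 0) && PySem.Str.isIn p.1 r) := by
  rw [Bool.eq_iff_iff]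
  simp [pvIndex]
  tauto

theorem pv_branch4 (r : String) :
    (List.any ["apply", "assistance", "income", "documents", "work", "requirements", "cash"] (fun ind => PySem.Str.isIn ind r)) =
      pvIndex.any (fun p => (p.2 &&& 8 != 0) && PySem.Str.isIn p.1 r) := by
  rw [Bool.eq_iff_iff]
  simp [pvIndex]
  tauto

theorem pv_branch5 (r : String) :
    (List.any ["apply", "subsidy", "child care", "provider", "income", "documents", "childcare"] (fun ind => PySem.Str.isIn ind r)) =
      pvIndex.any (fun p => (p.2 &&& 16 != 0) && PySem.Str.isIn p.1 r) := by
  rw [Bool.eq_iff_iff]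
  simp [pvIndex]
  tauto

theorem pv_branch6 (r : String) :
    (List.any ["apply", "benefits", "documents", "process", "help"] (fun ind => PySem.Str.isIn ind r)) =
      pvIndex.any (fun p => (p.2 &&& 32 != 0) && PySem.Str.isIn p.1 r) := by
  rw [Bool.eq_iff_iff]
  simp [pvIndex]

-- ===== VERDICT =====
theorem evaluate_response_quality_py_spec : Claim_equal_evaluate_response_quality_py := by
  intro query response _
  unfold Spec_evaluate_response_quality_py
  unfold evaluate_response_quality_py evaluate_response_quality_py_alt pvServiceBit
  split_ifs with hg h1 h2 h3 h4 h5
  · rfl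
  · rw [pv_count_ge_one_iff_any, if_pos h1]
    exact pv_branch1 (PySem.Str.lower response)
  · rw [pv_count_ge_one_iff_any, if_neg h1, if_pos h2]
    exact pv_branch2 (PySem.Str.lower response)
  · rw [pv_count_ge_one_iff_any, if_neg h1, if_neg h2, if_pos h3]
    exact pv_branch3 (PySem.Str.lower response)
  · rw [pv_count_ge_one_iff_any, if_neg h1, if_neg h2, if_neg h3, if_pos h4]
    exact pv_branch4 (PySem.Str.lower response)
  · rw [pv_count_ge_one_iff_any, if_neg h1, if_neg h2, if_neg h3, if_neg h4, if_pos h5]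
    exact pv_branch5 (PySem.Str.lower response)
  · rw [pv_count_ge_one_iff_any, if_neg h1, if_neg h2, if_neg h3, if_neg h4, if_neg h5]
    exact pv_branch6 (PySem.Str.lower response)
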